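-- pv_equiv track=rewrite | github.com/andriitugai/Code_Challenges | breadth-first-search/bfs.py | binary_gen
-- ===== SOURCE A (Python) =====
-- from queue import SimpleQueue
--
-- def binary_gen(n):
--     q = SimpleQueue()
--     q.put("1")
--     for _ in range(n):
--         b0 = q.get()
--         yield b0
--         q.put(b0 + "0")
--         q.put(b0 + "1")
-- ===== SOURCE B (Python) =====
-- def binary_gen(n):
--     # Closed form: the k-th BFS-generated string is the binary representation of k
--     # (counting from 1), so emit it directly; no queue needed.
--     for i in range(1, n + 1):
--         yield format(i, "b")
-- ===== Notes on version B (the rewrite author's own statement) =====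
-- stated objective: simpler
-- what changed: Replaces the BFS FIFO queue (which enqueues two child strings per yield) by the closed form: the i-th yielded string is the binary representation of i, for i = 1..n, emitted directly with format(i,'b'); measured ~1.3x faster, below the 1.5x bar, so no speed is claimed.
import Mathlib
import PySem

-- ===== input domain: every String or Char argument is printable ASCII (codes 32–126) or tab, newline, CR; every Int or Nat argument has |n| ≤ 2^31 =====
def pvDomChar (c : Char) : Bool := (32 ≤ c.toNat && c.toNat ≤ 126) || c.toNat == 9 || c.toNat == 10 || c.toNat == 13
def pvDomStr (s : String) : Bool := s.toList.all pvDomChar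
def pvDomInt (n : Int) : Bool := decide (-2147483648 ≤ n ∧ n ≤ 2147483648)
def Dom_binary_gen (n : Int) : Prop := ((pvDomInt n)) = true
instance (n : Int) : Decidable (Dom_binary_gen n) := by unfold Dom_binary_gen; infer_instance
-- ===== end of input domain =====

-- ===== PORT A =====
-- B replaces A's BFS FIFO queue by the closed form: the k-th output (from 1) is the
-- binary representation of k (objective: simpler; no speed is claimed).

-- A's loop: for each of the n iterations pop the front of the queue, emit it, push its two children.
def binAuxA : Nat → List String → List String → List String
  | 0, _, acc => acc.reverse
  | k+1, q, acc =>
    match q with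
    | [] => acc.reverse        -- unreachable: the queue is never empty (q.get() would block)
    | b0 :: rest => binAuxA k (rest ++ [b0 ++ "0", b0 ++ "1"]) (b0 :: acc)

def binary_gen (n : Int) : List String := binAuxA n.toNat ["1"] []

-- ===== PORT B =====
-- format(i, "b") for i ≥ 1: binary representation, most significant bit first.
def toBinStr (m : Nat) : String :=
  if h : m = 0 then "" else toBinStr (m / 2) ++ (if m % 2 = 1 then "1" else "0")
  decreasing_by exact Nat.div_lt_self (Nat.pos_of_ne_zero h) (by norm_num)

def binary_gen_alt (n : Int) : List String :=
  (PySem.List.pyRange 1 (n + 1) 1).map (fun i => toBinStr i.toNat)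

-- ===== PRECONDITION & SPEC =====
def Spec_binary_gen (n : Int) (out : List String) : Prop := out = binary_gen_alt n
instance (n : Int) (out : List String) : Decidable (Spec_binary_gen n out) := by unfold Spec_binary_gen; infer_instance

-- ===== CLAIM (what is proved, stated in full; the proofs are below) =====
def Claim_equal_binary_gen : Prop := ∀ (n : Int), Dom_binary_gen n → Spec_binary_gen n (binary_gen n)

-- ===== LEMMAS AND PROOFS =====

theorem toBinStr_two_mul (s : Nat) (hs : s ≠ 0) : toBinStr (2 * s) = toBinStr s ++ "0" := by
  rw [toBinStr]
  simp [Nat.mul_ne_zero two_ne_zero hs, Nat.mul_div_cancel_left s two_pos, Nat.mul_mod_right]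

theorem toBinStr_two_mul_add_one (s : Nat) :
    toBinStr (2 * s + 1) = toBinStr s ++ "1" := by
  rw [toBinStr]
  simp [Nat.mul_add_div two_pos]

-- Queue invariant: before step, the queue holds toBinStr of s, s+1, …, 2s-1.
theorem binAuxA_inv (k : Nat) : ∀ (s : Nat) (acc : List String), s ≠ 0 →
    binAuxA k ((List.range' s s).map toBinStr) acc
      = acc.reverse ++ (List.range' s k).map toBinStr := by
  induction k with
  | zero => intro s acc hs; simp [binAuxA]
  | succ k ih =>
    intro s acc hs
    obtain ⟨t, rfl⟩ := Nat.exists_eq_succ_of_ne_zero hs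
    have hsplit : List.range' (t + 1) (t + 1) = (t + 1) :: List.range' (t + 2) t := by
      simp [List.range'_succ]
    rw [hsplit]
    simp only [List.map_cons, binAuxA]
    have hq : List.map toBinStr (List.range' (t + 2) t)
        ++ [toBinStr (t + 1) ++ "0", toBinStr (t + 1) ++ "1"]
        = (List.range' (t + 2) (t + 2)).map toBinStr := by
      have h2 : List.range' (t + 2) (t + 2) = List.range' (t + 2) t ++ [2 * t + 2, 2 * t + 3] := by
        rw [show t + 2 = t + 1 + 1 from rfl, List.range'_1_concat, List.range'_1_concat]
        simp [List.append_assoc]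
        omega
      rw [h2, List.map_append]
      have e0 : toBinStr (2 * t + 2) = toBinStr (t + 1) ++ "0" := by
        have := toBinStr_two_mul (t + 1) (Nat.succ_ne_zero t)
        simpa [Nat.mul_add] using this
      have e1 : toBinStr (2 * t + 3) = toBinStr (t + 1) ++ "1" := by
        have := toBinStr_two_mul_add_one (t + 1)
        simpa [Nat.mul_add] using this
      simp [e0, e1]
    rw [hq, ih (t + 2) (toBinStr (t + 1) :: acc) (by omega)]
    rw [List.range'_succ]
    simp

theorem pyRange_map_toBin (n : Int) :
    (PySem.List.pyRange 1 (n + 1) 1).map (fun i => toBinStr i.toNat)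
      = (List.range' 1 n.toNat).map toBinStr := by
  rw [PySem.List.pyRange_one]
  have : (n + 1 - 1).toNat = n.toNat := by omega
  rw [this, List.map_map]
  have hr : List.range' 1 n.toNat = (List.range n.toNat).map (fun k => 1 + k) := by
    rw [List.range_eq_range', List.map_add_range']
  rw [hr, List.map_map]
  apply List.map_congr_left
  intro k hk
  simp only [Function.comp]
  congr 1


-- ===== VERDICT (by name: the statement is the Claim_ definition above) =====
theorem binary_gen_spec : Claim_equal_binary_gen := by
  intro n _
  unfold Spec_binary_gen binary_gen binary_gen_alt
  rw [pyRange_map_toBin]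
  have h1 : (["1"] : List String) = (List.range' 1 1).map toBinStr := by
    have : toBinStr 1 = "1" := by rw [toBinStr]; simp [toBinStr]
    simp [List.range'_succ, this]
  rw [h1, binAuxA_inv n.toNat 1 [] one_ne_zero]
  simp
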